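-- pv_equiv track=rewrite | github.com/MrUzairr/Python | funcs.py | SearchB
-- ===== SOURCE A (Python) =====
-- def SearchB(Arr,x):
--     # Sorting Array
--     for i in range(len(Arr)):
--         Arr.sort()
--
--     array = []
--     # checking the no. that is entered how much time is repeated
--     for j in range(len(Arr)):
--         if int(x)==Arr[j]:
--             array.append(j)
--     return array
-- ===== SOURCE B (Python) =====
-- def SearchB(Arr, x):
--     # Sort once in place (A also mutates Arr by sorting it).
--     Arr.sort()
--     t = int(x)
--     lt = 0
--     eq = 0
--     for v in Arr:
--         if v < t:
--             lt += 1
--         elif v == t: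
--             eq += 1
--     return list(range(lt, lt + eq))
-- ===== Notes on version B (the rewrite author's own statement) =====
-- stated objective: faster
-- what changed: B sorts once instead of len(Arr) times and, instead of scanning every index for equality, counts elements < x and == x in one pass and returns the contiguous index block list(range(lt, lt+eq)) that the matches occupy in the sorted array.
import Mathlib
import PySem

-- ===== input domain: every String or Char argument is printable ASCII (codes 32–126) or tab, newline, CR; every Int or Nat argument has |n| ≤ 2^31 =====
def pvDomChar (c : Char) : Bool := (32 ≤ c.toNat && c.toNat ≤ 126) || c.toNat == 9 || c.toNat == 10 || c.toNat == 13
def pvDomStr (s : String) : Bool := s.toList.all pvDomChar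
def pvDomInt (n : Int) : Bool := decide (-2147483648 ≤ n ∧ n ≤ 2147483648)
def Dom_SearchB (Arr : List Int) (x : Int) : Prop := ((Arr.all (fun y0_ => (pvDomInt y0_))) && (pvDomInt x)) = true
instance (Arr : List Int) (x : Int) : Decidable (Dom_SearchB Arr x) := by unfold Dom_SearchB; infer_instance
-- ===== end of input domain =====

-- B sorts once (A re-sorts len(Arr) times) and replaces the per-index equality scan by one
-- counting pass and a closed-form range of indices; return-value equivalence only is proved
-- (both Pythons mutate Arr by sorting it in place).


-- ===== PORT A =====
def SearchB (Arr : List Int) (x : Int) : List Int :=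
  -- for i in range(len(Arr)): Arr.sort()
  let arr1 := (PySem.List.pyRange 0 (PySem.List.len Arr) 1).foldl
      (fun a _ => PySem.List.sorted a (fun v => v) false) Arr
  -- for j in range(len(Arr)): if int(x)==Arr[j]: array.append(j)
  (PySem.List.pyRange 0 (PySem.List.len arr1) 1).foldl
      (fun array j => if x = PySem.List.pyGetD arr1 j 0 then array ++ [j] else array) []

-- ===== PORT B =====
def SearchB_alt (Arr : List Int) (x : Int) : List Int :=
  let s := PySem.List.sorted Arr (fun v => v) false
  let p := s.foldl
      (fun (acc : Int × Int) v =>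
        if v < x then (acc.1 + 1, acc.2) else if v = x then (acc.1, acc.2 + 1) else acc)
      (0, 0)
  PySem.List.pyRange p.1 (p.1 + p.2) 1

-- ===== PRECONDITION & SPEC =====
def Spec_SearchB (Arr : List Int) (x : Int) (out : List Int) : Prop := out = SearchB_alt Arr x
instance (Arr : List Int) (x : Int) (out : List Int) : Decidable (Spec_SearchB Arr x out) := by unfold Spec_SearchB; infer_instance

-- ===== CLAIM (what is proved, stated in full; the proofs are below) =====
def Claim_equal_SearchB : Prop := ∀ (Arr : List Int) (x : Int), Dom_SearchB Arr x → Spec_SearchB Arr x (SearchB Arr x)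

-- ===== LEMMAS AND PROOFS =====

-- iterating Arr.sort() len(Arr) times is just sorting once
lemma iter_sorted_const (L : List Int) (s : List Int)
    (hs : PySem.List.sorted s (fun v : Int => v) false = s) :
    L.foldl (fun a (_ : Int) => PySem.List.sorted a (fun v => v) false) s = s := by
  induction L with
  | nil => rfl
  | cons hd tl ih => simpa [List.foldl, hs] using ih

lemma iter_sorted (Arr : List Int) :
    (PySem.List.pyRange 0 (PySem.List.len Arr) 1).foldl
      (fun a (_ : Int) => PySem.List.sorted a (fun v => v) false) Arr
    = PySem.List.sorted Arr (fun v => v) false := by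
  cases Arr with
  | nil => decide
  | cons hd tl =>
      rw [PySem.List.pyRange_one_cons (by simp)]
      simp only [List.foldl]
      exact iter_sorted_const _ _ (PySem.List.sorted_sorted _ _)

-- B's counting fold computes (countP (· < x), countP (· = x))
lemma count_fold (s : List Int) (x : Int) (a b : Int) :
    s.foldl
      (fun (acc : Int × Int) v =>
        if v < x then (acc.1 + 1, acc.2) else if v = x then (acc.1, acc.2 + 1) else acc)
      (a, b)
    = (a + (s.countP (fun v => v < x) : Int), b + (s.countP (fun v => v = x) : Int)) := by
  induction s generalizing a b with
  | nil => simp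
  | cons hd tl ih =>
      by_cases h1 : hd < x
      · have h2 : ¬ hd = x := by omega
        simp only [List.foldl, if_pos h1, ih, List.countP_cons]
        simp [h1, h2]
        ring
      · by_cases h2 : hd = x
        · simp only [List.foldl, if_neg h1, if_pos h2, ih, List.countP_cons]
          simp [h2]
          ring
        · simp only [List.foldl, if_neg h1, if_neg h2, ih, List.countP_cons]
          simp [h1, h2]

-- on a sorted list, the indices holding x are exactly [countP (<x), countP (<x) + countP (=x))
lemma sorted_getElem_eq_iff (s : List Int) (hs : s.Pairwise (fun a b => a ≤ b)) (x : Int)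
    (j : Nat) (hj : j < s.length) :
    s[j] = x ↔ (s.countP (fun v => v < x) ≤ j ∧ j < s.countP (fun v => v < x) + s.countP (fun v => v = x)) := by
  induction s generalizing j with
  | nil => simp at hj
  | cons hd tl ih =>
      have hmin : ∀ y ∈ tl, hd ≤ y := fun y hy => (List.pairwise_cons.mp hs).1 y hy
      have htl : tl.Pairwise (fun a b => a ≤ b) := (List.pairwise_cons.mp hs).2
      by_cases h1 : hd < x
      · have h2 : ¬ hd = x := by omega
        cases j with
        | zero =>
            simp only [List.getElem_cons_zero, List.countP_cons]
            simp [h1, h2]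
        | succ k =>
            have hk : k < tl.length := by simpa using hj
            rw [List.getElem_cons_succ, ih htl k hk]
            simp [h1, h2]
            try omega
      · have hlt0' : tl.countP (fun v => v < x) = 0 ∨ x < hd := by
          by_cases hx : x ≤ hd
          · rcases lt_or_eq_of_le hx with h | h
            · exact Or.inr h
            · refine Or.inl ?_
              rw [List.countP_eq_zero]; intro y hy; have := hmin y hy; simp; omega
          · omega
        by_cases h2 : hd = x
        · have hlt0 : tl.countP (fun v => v < x) = 0 := by
            rw [List.countP_eq_zero]; intro y hy; have := hmin y hy; simp; omega
          cases j with
          | zero =>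
              simp only [List.getElem_cons_zero, List.countP_cons]
              simp [h2, hlt0]
          | succ k =>
              have hk : k < tl.length := by simpa using hj
              rw [List.getElem_cons_succ, ih htl k hk]
              simp [h2, hlt0]
              try omega
        · -- x < hd: no element of hd :: tl is < x or = x
          have hx : x < hd := by omega
          have hlt0 : tl.countP (fun v => v < x) = 0 := by
            rw [List.countP_eq_zero]; intro y hy; have := hmin y hy; simp; omega
          have heq0 : tl.countP (fun v => v = x) = 0 := by
            rw [List.countP_eq_zero]; intro y hy; have := hmin y hy; simp; omega
          have hne : ¬ (hd :: tl)[j] = x := by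
            have hmem : (hd :: tl)[j] ∈ hd :: tl := List.getElem_mem hj
            rcases List.mem_cons.mp hmem with h | h
            · rw [h]; omega
            · have := hmin _ h; omega
          simp [hne, h1, h2, hlt0, heq0]

theorem SearchB_spec : Claim_equal_SearchB := by
  intro Arr x _
  unfold Spec_SearchB SearchB SearchB_alt
  simp only [iter_sorted, count_fold, zero_add]
  set s := PySem.List.sorted Arr (fun v => v) false with hsdef
  have hs : s.Pairwise (fun a b => a ≤ b) := by
    simpa using PySem.List.sorted_pairwise Arr (fun v => v)
  set c := s.countP (fun v => v < x) with hc
  set e := s.countP (fun v => v = x) with he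
  rw [PySem.List.foldl_append_ite_eq_filter]
  simp only [List.nil_append]
  -- both sides are strictly increasing lists; show they have the same members
  have hbound : c + e ≤ s.length := by
    have h1 := List.length_eq_countP_add_countP (fun v => decide (v < x)) (l := s)
    have h2 : e ≤ s.countP (fun v => ¬ (v < x)) := by
      apply List.countP_mono_left
      intro a _ ha
      simp at ha ⊢
      omega
    have hco : s.countP (fun a => !decide (decide (a < x) = true))
        = s.countP (fun v => decide (¬ (v < x))) :=
      List.countP_congr (fun a _ => by simp)
    simp only [decide_not] at h1 h2 hco
    omega
  have key : ∀ j : Int,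
      j ∈ (PySem.List.pyRange 0 (PySem.List.len s) 1).filter
            (fun j => decide (x = PySem.List.pyGetD s j 0))
      ↔ j ∈ PySem.List.pyRange (c : Int) ((c : Int) + (e : Int)) 1 := by
    intro j
    rw [List.mem_filter, PySem.List.mem_pyRange_one, PySem.List.mem_pyRange_one]
    simp only [PySem.List.len_eq, decide_eq_true_eq]
    constructor
    · rintro ⟨⟨h0, hlen⟩, hx⟩
      have hjn : j.toNat < s.length := by omega
      rw [PySem.List.pyGetD_eq_getElem s 0 h0 (by simpa using hlen)] at hx
      have := (sorted_getElem_eq_iff s hs x j.toNat hjn).mp hx.symm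
      omega
    · rintro ⟨h1, h2⟩
      have h0 : (0 : Int) ≤ j := by omega
      have hjn : j.toNat < s.length := by omega
      have := (sorted_getElem_eq_iff s hs x j.toNat hjn).mpr (by omega)
      refine ⟨⟨h0, by omega⟩, ?_⟩
      rw [PySem.List.pyGetD_eq_getElem s 0 h0 (by omega)]
      exact this.symm
  have hpwL : ((PySem.List.pyRange 0 (PySem.List.len s) 1).filter
      (fun j => decide (x = PySem.List.pyGetD s j 0))).Pairwise (fun a b : Int => a < b) :=
    (PySem.List.pairwise_lt_pyRange_one 0 (PySem.List.len s)).sublist List.filter_sublist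
  have hpwR : (PySem.List.pyRange (c : Int) ((c : Int) + (e : Int)) 1).Pairwise (fun a b : Int => a < b) :=
    PySem.List.pairwise_lt_pyRange_one _ _
  have hndL := hpwL.imp (fun h => ne_of_lt h)
  have hndR := hpwR.imp (fun h => ne_of_lt h)
  have hperm := (List.perm_ext_iff_of_nodup hndL hndR).mpr key
  exact List.Perm.eq_of_pairwise (fun a b _ _ h h' => absurd h' (lt_asymm h)) hpwL hpwR hperm
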